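-- pv_equiv track=rewrite | github.com/lagameon/EFM | .memory/lib/working_memory.py | _get_current_phase
-- ===== SOURCE A (Python) =====
-- def _get_current_phase(plan_text: str) -> str:
--     """Get the name of the current (first uncompleted) phase."""
--     in_phases = False
--     for line in plan_text.splitlines():
--         if line.strip().startswith("## Phases"):
--             in_phases = True
--             continue
--         if in_phases and line.strip().startswith("## "):
--             break
--         if in_phases and line.strip().startswith("### Phase"):
--             if "[DONE]" not in line and "[done]" not in line:
--                 # Extract phase name
--                 name = line.strip().lstrip("#").strip()
--                 return name
--     return "Unknown"
-- ===== SOURCE B (Python) =====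
-- def _get_current_phase(plan_text: str) -> str:
--     """Get the name of the current (first uncompleted) phase."""
--     # Pass 1: collect the lines of the "## Phases" section.
--     section = []
--     in_phases = False
--     for line in plan_text.splitlines():
--         s = line.strip()
--         if s.startswith("## Phases"):
--             in_phases = True
--         elif in_phases:
--             if s.startswith("## "):
--                 break
--             section.append(line)
--     # Pass 2: first uncompleted phase header in that section.
--     for line in section:
--         s = line.strip()
--         if s.startswith("### Phase") and "[DONE]" not in line and "[done]" not in line:
--             return s.lstrip("#").strip()
--     return "Unknown"
-- ===== Notes on version B (the rewrite author's own statement) =====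
-- stated objective: simpler
-- what changed: Replaced A's single stateful loop (in_phases flag threaded through every branch, with continue/break/early-return interleaved) by a two-pass decomposition: first collect the '## Phases' section lines, then scan that section for the first uncompleted '### Phase' header.
import Mathlib
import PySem

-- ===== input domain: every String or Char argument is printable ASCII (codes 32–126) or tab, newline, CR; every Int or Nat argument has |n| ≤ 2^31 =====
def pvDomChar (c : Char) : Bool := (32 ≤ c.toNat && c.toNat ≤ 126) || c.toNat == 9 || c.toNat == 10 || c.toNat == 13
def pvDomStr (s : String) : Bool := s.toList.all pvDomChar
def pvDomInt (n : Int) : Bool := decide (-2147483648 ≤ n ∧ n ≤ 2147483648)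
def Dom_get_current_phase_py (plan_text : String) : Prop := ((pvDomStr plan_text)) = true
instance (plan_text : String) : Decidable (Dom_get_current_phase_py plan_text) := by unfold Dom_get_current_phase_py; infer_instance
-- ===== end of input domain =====

-- B replaces A's single stateful loop (flag + early return) by a two-pass decomposition:
-- collect the '## Phases' section, then scan it for the first uncompleted phase (objective: simpler).

-- ===== PORT A =====
-- line.strip().lstrip('#').strip(); lstrip('#') ported by hand as dropWhile (exact: drops leading '#' only)
def pvExtractName (line : String) : String :=
  PySem.Str.strip (String.ofList ((PySem.Str.strip line).toList.dropWhile (· == '#')))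

def pvGoA : List String → Bool → String
  | [], _ => "Unknown"
  | line :: rest, inPhases =>
    if PySem.Str.startswith (PySem.Str.strip line) "## Phases" then
      pvGoA rest true
    else if inPhases && PySem.Str.startswith (PySem.Str.strip line) "## " then
      "Unknown"
    else if inPhases && PySem.Str.startswith (PySem.Str.strip line) "### Phase" then
      if !(PySem.Str.isIn "[DONE]" line) && !(PySem.Str.isIn "[done]" line) then
        pvExtractName line
      else pvGoA rest inPhases
    else pvGoA rest inPhases

def get_current_phase_py (plan_text : String) : String :=
  pvGoA (PySem.Str.splitlines plan_text) false

-- ===== PORT B =====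
-- pass 1: collect the lines of the '## Phases' section (break at the next '## ' header)
def pvCollectB : List String → Bool → List String
  | [], _ => []
  | line :: rest, inPhases =>
    let s := PySem.Str.strip line
    if PySem.Str.startswith s "## Phases" then pvCollectB rest true
    else if inPhases then
      if PySem.Str.startswith s "## " then []
      else line :: pvCollectB rest true
    else pvCollectB rest false

-- pass 2: first uncompleted phase header in that section
def pvScanB : List String → String
  | [] => "Unknown"
  | line :: rest =>
    let s := PySem.Str.strip line
    if PySem.Str.startswith s "### Phase" && !(PySem.Str.isIn "[DONE]" line)
        && !(PySem.Str.isIn "[done]" line) then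
      -- s.lstrip('#').strip(); lstrip('#') ported by hand as dropWhile (exact)
      PySem.Str.strip (String.ofList (s.toList.dropWhile (· == '#')))
    else pvScanB rest

def get_current_phase_py_alt (plan_text : String) : String :=
  pvScanB (pvCollectB (PySem.Str.splitlines plan_text) false)

-- ===== PRECONDITION & SPEC =====
def Spec_get_current_phase_py (plan_text : String) (out : String) : Prop := out = get_current_phase_py_alt plan_text
instance (plan_text : String) (out : String) : Decidable (Spec_get_current_phase_py plan_text out) := by unfold Spec_get_current_phase_py; infer_instance

-- ===== CLAIM (what is proved, stated in full; the proofs are below) =====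
def Claim_equal_get_current_phase_py : Prop := ∀ (plan_text : String), Dom_get_current_phase_py plan_text → Spec_get_current_phase_py plan_text (get_current_phase_py plan_text)

-- ===== LEMMAS AND PROOFS =====
lemma pvGoA_eq (lines : List String) (inPhases : Bool) :
    pvGoA lines inPhases = pvScanB (pvCollectB lines inPhases) := by
  induction lines generalizing inPhases with
  | nil => rfl
  | cons line rest ih =>
    simp only [pvGoA, pvCollectB]
    cases hP : PySem.Str.startswith (PySem.Str.strip line) "## Phases" with
    | true => simp [ih]
    | false =>
      simp only [Bool.false_eq_true, if_false]
      cases inPhases with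
      | false => simp [ih]
      | true =>
        simp only [Bool.true_and]
        cases hB : PySem.Str.startswith (PySem.Str.strip line) "## " with
        | true => simp [pvScanB]
        | false =>
          simp only [Bool.false_eq_true, if_false]
          cases hPh : PySem.Str.startswith (PySem.Str.strip line) "### Phase" with
          | false => simp at hPh; simp [pvScanB, hPh, ih]
          | true =>
            simp at hPh
            cases hD1 : PySem.Str.isIn "[DONE]" line with
            | true => simp at hD1; simp [pvScanB, hPh, hD1, ih]
            | false =>
              simp at hD1
              cases hD2 : PySem.Str.isIn "[done]" line with
              | true => simp at hD2; simp [pvScanB, hPh, hD1, hD2, ih]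
              | false => simp at hD2; simp [pvScanB, hPh, hD1, hD2, pvExtractName]

-- ===== VERDICT (by name: the statement is the Claim_ definition above) =====
theorem get_current_phase_py_spec : Claim_equal_get_current_phase_py := by
  intro plan_text _
  unfold Spec_get_current_phase_py get_current_phase_py get_current_phase_py_alt
  exact pvGoA_eq _ _
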